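-- pv_equiv track=rewrite | github.com/minchjung/Algorithm | Programmers_set_Programming_Maester/arithmetic_operation.py | solution
-- ===== SOURCE A (Python) =====
-- def solution(arr):
--
--     num = [int(arr[0])]
--     for i,a in enumerate(arr) :
--         if a == "-" : num.append( -int(arr[i+1]) )
--         elif a == "+" : num.append( int(arr[i+1]) )
--
--     N = len(num)
--     num.reverse()
--     dp = [[0,0] for _ in range(N)]
--     dp[0] = [num[0], num[0]]
--
--     for i in range(1, N) :
--         val1 = dp[i-1][0] + num[i]
--         val2 = dp[i-1][1] + num[i]
--         if num[i] >= 0 :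
--             dp[i][0] = max(val1, val2)
--             dp[i][1] = min(val1, val2)
--         else :
--             dp[i][0] = max(val1,val2, -(dp[i-1][0] - num[i]), -(dp[i-1][1] - num[i]))
--             dp[i][1] = min(val1,val2, -(dp[i-1][0] - num[i]), -(dp[i-1][1] - num[i]))
--     return dp[N-1][0]
-- ===== SOURCE B (Python) =====
-- def solution(arr):
--     nums = [int(arr[0])]
--     for op, nxt in zip(arr, arr[1:]):
--         if op == "-":
--             nums.append(-int(nxt))
--         elif op == "+":
--             nums.append(int(nxt))
--     # closed-form forward scan: sum up to and including the first negative value,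
--     # then each negative closes its preceding nonnegative run as |run + v|.
--     total = 0
--     i = 0
--     n = len(nums)
--     while i < n and nums[i] >= 0:
--         total += nums[i]
--         i += 1
--     if i == n:
--         return total
--     total += nums[i]
--     i += 1
--     run = 0
--     for v in nums[i:]:
--         if v >= 0:
--             run += v
--         else:
--             total += abs(run + v)
--             run = 0
--     return total + run
-- ===== Notes on version B (the rewrite author's own statement) =====
-- stated objective: alternative
-- what changed: A reverses the parsed value list and runs a max/min dynamic program with a dp table of pairs; B makes one forward pass with a closed-form accumulator (sum through the first negative value, then each negative closes its preceding nonnegative run as |run + v|), with no reverse, no dp table and no 4-way max/min.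
import Mathlib
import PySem

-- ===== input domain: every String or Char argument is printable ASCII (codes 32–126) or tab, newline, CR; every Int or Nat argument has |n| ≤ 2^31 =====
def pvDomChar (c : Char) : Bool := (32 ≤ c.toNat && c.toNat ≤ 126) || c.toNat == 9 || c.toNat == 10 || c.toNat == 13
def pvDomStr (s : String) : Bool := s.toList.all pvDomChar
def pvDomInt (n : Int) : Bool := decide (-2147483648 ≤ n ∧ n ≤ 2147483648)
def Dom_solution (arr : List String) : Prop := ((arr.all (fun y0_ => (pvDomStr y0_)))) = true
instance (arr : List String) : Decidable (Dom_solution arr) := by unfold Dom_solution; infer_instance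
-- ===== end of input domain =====

-- B replaces A's reversed max/min dynamic program by a single forward scan with a
-- closed-form accumulator (sum through the first negative value, then each negative
-- closes its preceding nonnegative run as |run + v|): no reverse, no dp table.

-- ===== PORT A =====
-- int(arr[i]) with IndexError/ValueError as `none`, defaulted to 0 (junk outside Pre_)
def pvIntAt (arr : List String) (i : Int) : Int :=
  ((PySem.List.pyGet? arr i).bind PySem.Int.ofStr?).getD 0

-- num = [int(arr[0])]; for i,a in enumerate(arr): if a=="-"/"+": num.append(∓int(arr[i+1]))
def pvParseA (arr : List String) : List Int :=
  (PySem.List.enumerate arr).foldl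
    (fun num p =>
      if p.2 = "-" then num ++ [-(pvIntAt arr (p.1 + 1))]
      else if p.2 = "+" then num ++ [pvIntAt arr (p.1 + 1)]
      else num)
    [pvIntAt arr 0]

-- the dp loop: dp[i] only reads dp[i-1], carried as a pair (dp[i][0], dp[i][1])
def pvStepA (dp : Int × Int) (v : Int) : Int × Int :=
  let val1 := dp.1 + v
  let val2 := dp.2 + v
  if v ≥ 0 then (max val1 val2, min val1 val2)
  else (max (max val1 val2) (max (-(dp.1 - v)) (-(dp.2 - v))),
        min (min val1 val2) (min (-(dp.1 - v)) (-(dp.2 - v))))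

def solution (arr : List String) : Int :=
  let num := pvParseA arr
  match num.reverse with
  | [] => 0          -- unreachable: num starts from [int(arr[0])]
  | h :: t => (t.foldl pvStepA (h, h)).1

-- ===== PORT B =====
def pvVal (s : String) : Int := (PySem.Int.ofStr? s).getD 0

-- nums = [int(arr[0])]; for op, nxt in zip(arr, arr[1:]): …
def pvParseB (arr : List String) : List Int :=
  (arr.zip arr.tail).foldl
    (fun nums p =>
      if p.1 = "-" then nums ++ [-(pvVal p.2)]
      else if p.1 = "+" then nums ++ [pvVal p.2]
      else nums)
    [pvVal (arr.headD "")]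

-- the `for v in nums[i:]` loop, state (total, run)
def pvPhase2 (acc : Int × Int) (v : Int) : Int × Int :=
  if v ≥ 0 then (acc.1, acc.2 + v) else (acc.1 + |acc.2 + v|, 0)

-- the leading `while` loop: sum until (and including) the first negative value
def pvPhase1 (total : Int) : List Int → Int
  | [] => total
  | v :: rest =>
    if v ≥ 0 then pvPhase1 (total + v) rest
    else
      let p := rest.foldl pvPhase2 (total + v, 0)
      p.1 + p.2

def solution_alt (arr : List String) : Int :=
  pvPhase1 0 (pvParseB arr)

-- ===== PRECONDITION & SPEC =====
-- Pre_ = exactly where Python A returns: arr nonempty, int(arr[0]) parses, every "+"/"-"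
-- token is followed by a token (so not last: IndexError) that parses as int (ValueError).
def Pre_solution (arr : List String) : Prop :=
  arr ≠ [] ∧ (PySem.Int.ofStr? (arr.headD "")).isSome = true ∧
  (∀ p ∈ arr.zip arr.tail, (p.1 = "+" ∨ p.1 = "-") → (PySem.Int.ofStr? p.2).isSome = true) ∧
  arr.getLast? ≠ some "+" ∧ arr.getLast? ≠ some "-"
instance (arr : List String) : Decidable (Pre_solution arr) := by unfold Pre_solution; infer_instance

def pvWitness_solution : List String := ["1", "+", "2", "-", "3"]

def Spec_solution (arr : List String) (out : Int) : Prop := out = solution_alt arr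
instance (arr : List String) (out : Int) : Decidable (Spec_solution arr out) := by unfold Spec_solution; infer_instance

-- ===== CLAIM (what is proved, stated in full; the proofs are below) =====
def Claim_equal_solution : Prop := ∀ (arr : List String), Dom_solution arr → Pre_solution arr → Spec_solution arr (solution arr)

-- ===== LEMMAS AND PROOFS =====

-- abstract one-pass state (M, c): A's dp pair is (M + c, -M + c), B's scan totals M + c
def pvMC (p : Int × Int) (v : Int) : Int × Int :=
  if v ≥ 0 then (p.1, p.2 + v) else (p.1 + |p.2|, v)

-- run the pvMC machine from the right end of the (un-reversed) value list
def pvR (l : List Int) : Int × Int := l.foldr (fun v p => pvMC p v) (0, 0)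

-- A's dp loop is the pvMC machine in disguise
theorem stepA_eq_MC (t : List Int) (M c : Int) (h : 0 ≤ M) :
    t.foldl pvStepA (M + c, -M + c) =
      ((t.foldl pvMC (M, c)).1 + (t.foldl pvMC (M, c)).2,
       -(t.foldl pvMC (M, c)).1 + (t.foldl pvMC (M, c)).2) := by
  induction t generalizing M c with
  | nil => simp
  | cons v r ih =>
    rw [List.foldl_cons, List.foldl_cons]
    by_cases hv : v ≥ 0
    · have hp : pvStepA (M + c, -M + c) v = (M + (c + v), -M + (c + v)) := by
        simp only [pvStepA, if_pos hv, Prod.mk.injEq]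
        omega
      have hq : pvMC (M, c) v = (M, c + v) := by simp [pvMC, hv]
      rw [hp, hq]
      exact ih M (c + v) h
    · have hp : pvStepA (M + c, -M + c) v = ((M + |c|) + v, -(M + |c|) + v) := by
        simp only [pvStepA, if_neg hv, Prod.mk.injEq]
        rcases abs_cases c with ⟨h1, h2⟩ | ⟨h1, h2⟩ <;> omega
      have hq : pvMC (M, c) v = (M + |c|, v) := by simp [pvMC, hv]
      rw [hp, hq]
      exact ih (M + |c|) v (by positivity)

theorem MC_first (h : Int) : pvMC (0, 0) h = (0, h) := by
  simp only [pvMC]; split <;> simp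

-- B's inner for-loop computes the pvR value, threading (total, run)
theorem phase2_eq (r : List Int) (t run : Int) (h : 0 ≤ run) :
    (r.foldl pvPhase2 (t, run)).1 + (r.foldl pvPhase2 (t, run)).2
      = t + (pvR r).1 + |run + (pvR r).2| := by
  induction r generalizing t run with
  | nil => simp [pvR, abs_of_nonneg h]
  | cons v r' ih =>
    simp only [List.foldl_cons, pvPhase2, pvR, List.foldr_cons]
    by_cases hv : v ≥ 0
    · rw [if_pos hv]
      have := ih t (run + v) (by omega)
      simp only [pvR] at this
      rw [this, pvMC, if_pos hv]
      ring_nf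
    · rw [if_neg hv]
      have := ih (t + |run + v|) 0 le_rfl
      simp only [pvR] at this
      rw [this, pvMC, if_neg hv]
      simp only [zero_add]
      ring_nf

-- B's whole scan computes the pvR value
theorem phase1_eq (l : List Int) (total : Int) :
    pvPhase1 total l = total + (pvR l).1 + (pvR l).2 := by
  induction l generalizing total with
  | nil => simp [pvPhase1, pvR]
  | cons v r ih =>
    simp only [pvPhase1, pvR, List.foldr_cons]
    by_cases hv : v ≥ 0
    · rw [if_pos hv, ih, pvMC, if_pos hv]
      simp only [pvR]; ring
    · rw [if_neg hv, pvMC, if_neg hv]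
      have := phase2_eq r (total + v) 0 le_rfl
      simp only [zero_add] at this
      simp only [this, pvR]
      ring

-- the two parses agree whenever the last token is not a dangling operator
theorem parse_go (arr : List String) (suf : List String) (k : Nat) (acc : List Int)
    (hdrop : arr.drop k = suf)
    (hl1 : arr.getLast? ≠ some "+") (hl2 : arr.getLast? ≠ some "-") :
    (PySem.List.enumerate suf k).foldl
      (fun num p =>
        if p.2 = "-" then num ++ [-(pvIntAt arr (p.1 + 1))]
        else if p.2 = "+" then num ++ [pvIntAt arr (p.1 + 1)]
        else num) acc
    = (suf.zip suf.tail).foldl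
      (fun nums p =>
        if p.1 = "-" then nums ++ [-(pvVal p.2)]
        else if p.1 = "+" then nums ++ [pvVal p.2]
        else nums) acc := by
  induction suf generalizing k acc with
  | nil => simp [PySem.List.enumerate_nil]
  | cons a suf' ih =>
    cases suf' with
    | nil =>
      -- a is the last token of arr: not "+"/"-", so both folds leave acc unchanged
      have hlast : arr.getLast? = some a := by
        have htd := List.take_append_drop k arr
        rw [hdrop] at htd
        rw [← htd]
        exact (List.getLast?_concat :
          (List.take k arr ++ [a]).getLast? = some a)
      have ha1 : a ≠ "+" := fun h => hl1 (h ▸ hlast)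
      have ha2 : a ≠ "-" := fun h => hl2 (h ▸ hlast)
      simp [PySem.List.enumerate_cons, PySem.List.enumerate_nil, ha1, ha2]
    | cons b rest =>
      have hb : arr[k + 1]? = some b := by
        have h1 : (arr.drop k)[1]? = arr[k + 1]? := List.getElem?_drop
        rw [hdrop] at h1
        simpa using h1.symm
      have hval : pvIntAt arr ((k : Int) + 1) = pvVal b := by
        have : ((k : Int) + 1) = ((k + 1 : Nat) : Int) := by push_cast; ring
        rw [pvIntAt, this, PySem.List.pyGet?_natCast, hb]
        rfl
      have hdrop' : arr.drop (k + 1) = b :: rest := by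
        have h1 : (arr.drop k).tail = arr.drop (k + 1) := List.tail_drop
        rw [hdrop] at h1
        simpa using h1.symm
      have ihx := ih (k + 1) (acc := if a = "-" then acc ++ [-(pvVal b)]
          else if a = "+" then acc ++ [pvVal b] else acc) hdrop'
      simp only [PySem.List.enumerate_cons, List.foldl_cons, List.tail_cons, List.zip_cons_cons,
        Nat.cast_add, Nat.cast_one] at ihx ⊢
      rw [hval]
      exact ihx

theorem parse_eq (arr : List String)
    (hl1 : arr.getLast? ≠ some "+") (hl2 : arr.getLast? ≠ some "-") :
    pvParseA arr = pvParseB arr := by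
  have hacc : pvIntAt arr 0 = pvVal (arr.headD "") := by
    cases arr with
    | nil => decide
    | cons a l => rw [pvIntAt, PySem.List.pyGet?_zero]; rfl
  rw [pvParseA, pvParseB, ← hacc]
  exact parse_go arr arr 0 _ (by simp) hl1 hl2

-- parseB is never empty: the fold only ever appends to its accumulator
theorem parseB_ne_nil (arr : List String) : pvParseB arr ≠ [] := by
  rw [pvParseB]
  have : ∀ (l : List (String × String)) (acc : List Int), acc ≠ [] →
      l.foldl (fun nums p =>
        if p.1 = "-" then nums ++ [-(pvVal p.2)]
        else if p.1 = "+" then nums ++ [pvVal p.2]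
        else nums) acc ≠ [] := by
    intro l
    induction l with
    | nil => intro acc h; simpa using h
    | cons p r ih =>
      intro acc h
      simp only [List.foldl_cons]
      apply ih
      by_cases h1 : p.1 = "-" <;> by_cases h2 : p.1 = "+" <;> simp [h1, h2, h]
  exact this _ _ (by simp)

-- ===== VERDICT (by name: the statement is the Claim_ definition above) =====
theorem solution_spec : Claim_equal_solution := by
  intro arr _ hpre
  obtain ⟨-, -, -, hl1, hl2⟩ := hpre
  unfold Spec_solution solution solution_alt
  rw [parse_eq arr hl1 hl2]
  set num := pvParseB arr with hnum
  obtain ⟨h, t, hrev⟩ : ∃ h t, num.reverse = h :: t :=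
    List.exists_cons_of_ne_nil (by simpa using parseB_ne_nil arr)
  simp only [hrev]
  -- A's fold over the reversed list = pvMC machine started at (0,0)
  have hA : (t.foldl pvStepA (h, h)).1 = (pvR num).1 + (pvR num).2 := by
    have h0 : t.foldl pvStepA (h, h) = t.foldl pvStepA ((0 : Int) + h, -(0 : Int) + h) := by
      norm_num
    rw [h0, stepA_eq_MC t 0 h le_rfl]
    have hfold : t.foldl pvMC (0, h) = num.reverse.foldl pvMC (0, 0) := by
      rw [hrev, List.foldl_cons, MC_first]
    rw [show ((0 : Int), h) = pvMC (0, 0) h from (MC_first h).symm, ← List.foldl_cons, ← hrev,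
      List.foldl_reverse]
    rfl
  rw [hA, phase1_eq]
  ring
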